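-- pv_equiv track=rewrite | github.com/bakzs/telbot | Screenshot_test.py/UberRun_Prototype2.8.py | set_directionstoprint
-- ===== SOURCE A (Python) =====
-- def set_directionstoprint(directionstorage):
--     counter = 0
--
--     #directionstoprint is a string that will contain all the directions that will be sent to the user
--     directionstoprint = ''
--
--     #[6:] because directions start from index 6 of the directionstorage list
--     for direction in directionstorage[6:-1]:
--         counter += 1
--         directionstoprint += direction
--         directionstoprint += ' '
--
--         #To indicate that each step of the directions is to be printed on a new line
--         #Each step of the directions contains: S/N of directions, direction statement, travelled distance, and total travelled distance
--         #Therefore, every 5th element has to be printed on a new line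
--         if counter == 4:
--             directionstoprint += '\n'
--             counter = 0
--     directionstoprint += 'is the total distance. '
--     return directionstoprint
-- ===== SOURCE B (Python) =====
-- def set_directionstoprint(directionstorage):
--     sl = directionstorage[6:-1]
--     parts = []
--     for i in range(0, len(sl), 4):
--         chunk = sl[i:i + 4]
--         parts.append(''.join(e + ' ' for e in chunk))
--         if len(chunk) == 4:
--             parts.append('\n')
--     parts.append('is the total distance. ')
--     return ''.join(parts)
-- ===== Notes on version B (the rewrite author's own statement) =====
-- stated objective: alternative
-- what changed: B replaces A's manual counter-and-string-accumulation loop by slicing the directions into chunks of 4, emitting one joined part per chunk (newline only after full chunks) and joining the parts at the end.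
import Mathlib
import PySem

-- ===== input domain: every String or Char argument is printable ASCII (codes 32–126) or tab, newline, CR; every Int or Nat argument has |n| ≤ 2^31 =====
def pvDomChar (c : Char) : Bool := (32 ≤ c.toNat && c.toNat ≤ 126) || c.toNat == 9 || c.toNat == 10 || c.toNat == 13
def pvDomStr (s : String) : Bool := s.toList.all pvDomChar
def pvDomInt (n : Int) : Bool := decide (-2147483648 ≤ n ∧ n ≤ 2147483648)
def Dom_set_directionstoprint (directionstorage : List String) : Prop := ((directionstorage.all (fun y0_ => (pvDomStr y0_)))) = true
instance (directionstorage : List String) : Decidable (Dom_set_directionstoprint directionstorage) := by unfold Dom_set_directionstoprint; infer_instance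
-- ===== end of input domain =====

-- ===== PORT A =====
-- B formats directionstorage[6:-1] by chunks of 4 instead of A's running counter; alternative decomposition, same cost.
def pvStepA (st : Int × String) (direction : String) : Int × String :=
  let counter := st.1 + 1
  let dp := st.2 ++ direction ++ " "
  if counter == 4 then (0, dp ++ "\n") else (counter, dp)

def set_directionstoprint (directionstorage : List String) : String :=
  let st := (PySem.List.slice directionstorage (some 6) (some (-1))).foldl pvStepA ((0 : Int), "")
  st.2 ++ "is the total distance. "

-- ===== PORT B =====
-- consecutive chunks of 4 of sl (= Source B's sl[i:i+4] for i in range(0, len(sl), 4))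
def pvChunks : List String → List (List String)
  | [] => []
  | x :: xs => (x :: xs.take 3) :: pvChunks (xs.drop 3)
termination_by l => l.length
decreasing_by simp

def pvStepB (parts : List String) (chunk : List String) : List String :=
  let piece := String.join (chunk.map (fun e => e ++ " "))
  let parts := parts ++ [piece]
  if chunk.length == 4 then parts ++ ["\n"] else parts

def set_directionstoprint_alt (directionstorage : List String) : String :=
  let sl := PySem.List.slice directionstorage (some 6) (some (-1))
  String.join ((pvChunks sl).foldl pvStepB [] ++ ["is the total distance. "])

-- ===== PRECONDITION & SPEC =====
def Spec_set_directionstoprint (directionstorage : List String) (out : String) : Prop := out = set_directionstoprint_alt directionstorage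
instance (directionstorage : List String) (out : String) : Decidable (Spec_set_directionstoprint directionstorage out) := by unfold Spec_set_directionstoprint; infer_instance

-- ===== CLAIM (what is proved, stated in full; the proofs are below) =====
def Claim_equal_set_directionstoprint : Prop := ∀ (directionstorage : List String), Dom_set_directionstoprint directionstorage → Spec_set_directionstoprint directionstorage (set_directionstoprint directionstorage)

-- ===== LEMMAS AND PROOFS =====

theorem pvChunks_nil : pvChunks [] = [] := by rw [pvChunks]

theorem pvChunks_cons (x : String) (xs : List String) :
    pvChunks (x :: xs) = (x :: xs.take 3) :: pvChunks (xs.drop 3) := by rw [pvChunks]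

theorem stepB_shift (ps : List String) (c : List String) :
    pvStepB ps c = ps ++ pvStepB [] c := by
  simp [pvStepB]; split <;> simp

theorem foldB_shift (cs : List (List String)) (ps : List String) :
    List.foldl pvStepB ps cs = ps ++ List.foldl pvStepB [] cs := by
  induction cs generalizing ps with
  | nil => simp
  | cons c cs ih =>
    simp only [List.foldl_cons]
    rw [ih, ih (pvStepB [] c), stepB_shift]
    simp

theorem foldl_append_str (z : String) (l : List String) :
    List.foldl (fun r s => r ++ s) z l = z ++ List.foldl (fun r s => r ++ s) "" l := by
  induction l generalizing z with
  | nil => simp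
  | cons h tl ih => simp only [List.foldl_cons]; rw [ih (z ++ h), ih ("" ++ h)]; simp [String.append_assoc]

theorem keyA : ∀ (n : Nat) (l : List String), l.length ≤ n → ∀ s : String,
    (List.foldl pvStepA (0, s) l).2 = s ++ String.join (List.foldl pvStepB [] (pvChunks l)) := by
  intro n
  induction n with
  | zero =>
    intro l hl s
    have : l = [] := List.eq_nil_of_length_eq_zero (Nat.le_zero.mp hl)
    subst this; simp [pvChunks_nil, String.join]
  | succ n ih =>
    intro l hl s
    rcases l with _ | ⟨a, _ | ⟨b, _ | ⟨c, _ | ⟨d, t⟩⟩⟩⟩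
    · simp [pvChunks_nil, String.join]
    · simp [pvChunks_cons, pvChunks_nil, pvStepA, pvStepB, String.join, String.append_assoc]
    · simp [pvChunks_cons, pvChunks_nil, pvStepA, pvStepB, String.join, String.append_assoc]
    · simp [pvChunks_cons, pvChunks_nil, pvStepA, pvStepB, String.join, String.append_assoc]
    · have ht : t.length ≤ n := by simp at hl; omega
      have hch : pvChunks (a :: b :: c :: d :: t) = [a, b, c, d] :: pvChunks t := by
        simp [pvChunks_cons]
      rw [hch]
      simp only [List.foldl_cons]
      rw [foldB_shift (pvChunks t) (pvStepB [] [a, b, c, d])]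
      have hstep : pvStepA (pvStepA (pvStepA (pvStepA ((0 : Int), s) a) b) c) d
          = ((0 : Int), s ++ a ++ " " ++ b ++ " " ++ c ++ " " ++ d ++ " " ++ "\n") := by
        simp [pvStepA]
      rw [hstep, ih t ht]
      simp only [pvStepB, String.join, List.length_cons, List.length_nil, List.map, List.nil_append,
        List.cons_append, List.foldl_cons, List.foldl_nil, Nat.reduceAdd, beq_self_eq_true, if_true,
        String.append_assoc, String.empty_append]
      rw [foldl_append_str (a ++ (" " ++ (b ++ (" " ++ (c ++ (" " ++ (d ++ (" " ++ "\n"))))))))]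
      simp only [String.append_assoc]

-- ===== VERDICT (by name: the statement is the Claim_ definition above) =====
theorem set_directionstoprint_spec : Claim_equal_set_directionstoprint := by
  intro ds _
  unfold Spec_set_directionstoprint set_directionstoprint set_directionstoprint_alt
  have h := keyA (PySem.List.slice ds (some 6) (some (-1))).length
    (PySem.List.slice ds (some 6) (some (-1))) (le_refl _) ""
  simp only [] at h ⊢
  rw [h]
  simp [String.join]
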